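-- pv_equiv track=rewrite | github.com/Dominguezsa/Algorithm-Theory | practica/Grafos/Set_Cover.py | backtrack
-- ===== SOURCE A (Python) =====
-- def es_solucion(universo, parcial):
--     res = []
--     for valores in parcial:
--         for valor in valores:
--             if valor not in res:
--                 res.append(valor)
--     return len(res) == len(universo)
--
-- def aporta_algo(parcial, nuevo):
--     if len(parcial) == 0:
--         return True
--     for elemento in nuevo:
--         for subset in parcial:
--             if elemento not in subset:
--                 return True
--     return False
--
-- def backtrack(max_n, grupo, asignacion_actual, sets, universe):
--     if es_solucion(universe, asignacion_actual):
--         return True, asignacion_actual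
--     if grupo == len(sets):
--         return False, None
--     if len(asignacion_actual) == max_n:
--         return False, None
--     if aporta_algo(asignacion_actual, sets[grupo]):
--         asignar(sets[grupo], asignacion_actual)
--         if backtrack(max_n, grupo + 1, asignacion_actual, sets, universe)[0]:
--             return True, asignacion_actual
--         desasignar(sets[grupo], asignacion_actual)
--     if backtrack(max_n, grupo + 1, asignacion_actual, sets, universe)[0]:
--         return True, asignacion_actual
--     return False, None
--
-- def asignar(grupo, asignacion_actual):
--     asignacion_actual.append(grupo)
--
-- def desasignar(grupo, asignacion_actual):
--     asignacion_actual.remove(grupo)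
-- ===== SOURCE B (Python) =====
-- # Iterative explicit-stack DFS replacing the recursion of A; same include-first/exclude-second
-- # order, same in-place append / remove-first undo, same return values (and same mutation of
-- # asignacion_actual).
--
-- def es_solucion(universo, parcial):
--     res = []
--     for valores in parcial:
--         for valor in valores:
--             if valor not in res:
--                 res.append(valor)
--     return len(res) == len(universo)
--
-- def aporta_algo(parcial, nuevo):
--     if len(parcial) == 0:
--         return True
--     for elemento in nuevo:
--         for subset in parcial:
--             if elemento not in subset:
--                 return True
--     return False
--
-- def backtrack(max_n, grupo, asignacion_actual, sets, universe):
--     g = grupo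
--     pending = []  # groups whose include-branch is currently open (deepest last)
--     while True:
--         if es_solucion(universe, asignacion_actual):
--             return True, asignacion_actual
--         if g >= len(sets) or len(asignacion_actual) == max_n:
--             # dead end: undo the deepest open include and take its exclude branch
--             if not pending:
--                 return False, None
--             gf = pending.pop()
--             asignacion_actual.remove(sets[gf])
--             g = gf + 1
--         elif aporta_algo(asignacion_actual, sets[g]):
--             pending.append(g)
--             asignacion_actual.append(sets[g])
--             g = g + 1
--         else:
--             g = g + 1
-- ===== Notes on version B (the rewrite author's own statement) =====
-- stated objective: alternative
-- what changed: The recursive backtracking search is rewritten as an iterative depth-first search with an explicit stack of open include-branches, preserving the include-first order and the in-place append/remove-first undo.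
import Mathlib
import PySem

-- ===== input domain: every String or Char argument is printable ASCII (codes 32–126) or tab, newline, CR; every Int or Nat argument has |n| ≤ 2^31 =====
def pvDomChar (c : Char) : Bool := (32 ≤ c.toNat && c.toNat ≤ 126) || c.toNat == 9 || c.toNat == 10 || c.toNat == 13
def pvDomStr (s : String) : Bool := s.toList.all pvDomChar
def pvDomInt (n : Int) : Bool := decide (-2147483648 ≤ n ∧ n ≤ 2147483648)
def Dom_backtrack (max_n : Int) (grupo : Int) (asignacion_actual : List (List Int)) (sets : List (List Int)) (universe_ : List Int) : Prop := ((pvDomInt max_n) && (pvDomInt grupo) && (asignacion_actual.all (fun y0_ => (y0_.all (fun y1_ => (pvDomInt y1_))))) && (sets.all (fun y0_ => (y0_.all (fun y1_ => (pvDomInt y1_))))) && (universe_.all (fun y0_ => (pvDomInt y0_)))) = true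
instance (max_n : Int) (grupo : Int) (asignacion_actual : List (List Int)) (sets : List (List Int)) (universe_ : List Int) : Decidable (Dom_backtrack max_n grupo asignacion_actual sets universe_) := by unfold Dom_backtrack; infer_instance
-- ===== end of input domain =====

-- B replaces A's recursion by an iterative explicit-stack DFS with the same include-first order
-- and the same append/remove-first undo (objective: alternative decomposition). A mutates
-- asignacion_actual in place; the equivalence proved here is about the RETURN value only
-- (Python B performs the same in-place mutations as A).


-- ===== PORT A =====

-- helper es_solucion (shared verbatim by A and B in Python)
def esSol (universo : List Int) (parcial : List (List Int)) : Bool :=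
  -- res accumulates first occurrences of values, exactly as the Python loops do
  let res := parcial.foldl (fun res valores =>
    valores.foldl (fun r valor => if r.contains valor then r else r ++ [valor]) res) []
  res.length == universo.length

-- helper aporta_algo (shared verbatim by A and B in Python); the nested for/return True = any
def aporta (parcial : List (List Int)) (nuevo : List Int) : Bool :=
  if parcial.length == 0 then true
  else nuevo.any (fun elemento => parcial.any (fun subset => !(subset.contains elemento)))

-- desasignar: list.remove (first occurrence); the value is always present on admitted inputs,
-- so the .getD default is never used there
def rmF (l : List (List Int)) (x : List Int) : List (List Int) :=
  (PySem.List.remove? l x).getD l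

-- A's recursion with the mutable list threaded as state: the Bool is the returned flag, the
-- list is the state of asignacion_actual after the call (= the returned alias on success).
-- fuel is only for termination; the caller passes fuel = len(sets) - grupo, and the recursion
-- stops at grupo == len(sets) before fuel runs out on every admitted input.
def goA (max_n : Int) (sets : List (List Int)) (universe_ : List Int)
    (fuel : Nat) (g : Int) (lst : List (List Int)) : Bool × List (List Int) :=
  if esSol universe_ lst then (true, lst)
  else if g == (sets.length : Int) then (false, lst)
  else if (lst.length : Int) == max_n then (false, lst)
  else
    match fuel with
    | 0 => (false, lst)  -- unreachable on admitted inputs (fuel = len(sets) - g there)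
    | fuel' + 1 =>
      -- sets[grupo] with Python indexing is (PySem.List.pyGet? sets g).getD []
      if aporta lst ((PySem.List.pyGet? sets g).getD []) then
        -- asignar, recurse
        let r := goA max_n sets universe_ fuel' (g + 1)
          (lst ++ [(PySem.List.pyGet? sets g).getD []])
        if r.1 then (true, r.2)
        else
          -- desasignar, then the exclude recursion
          let r2 := goA max_n sets universe_ fuel' (g + 1)
            (rmF r.2 ((PySem.List.pyGet? sets g).getD []))
          if r2.1 then (true, r2.2) else (false, r2.2)
      else
        let r2 := goA max_n sets universe_ fuel' (g + 1) lst
        if r2.1 then (true, r2.2) else (false, r2.2)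

def backtrack (max_n : Int) (grupo : Int) (asignacion_actual : List (List Int)) (sets : List (List Int)) (universe_ : List Int) : Bool × Option (List (List Int)) :=
  let r := goA max_n sets universe_ (((sets.length : Int) - grupo).toNat) grupo asignacion_actual
  if r.1 then (true, some r.2) else (false, none)

-- ===== PORT B =====

-- the while-True loop of Source B: g is the current group, lst the (shared, mutated) partial
-- assignment, stack the open include-branches (deepest last in Python; head = deepest here).
-- fuel only makes the loop structurally recursive; the caller passes 3^(len(sets)-g), an upper
-- bound on the number of iterations, so the 0 case is never reached on admitted inputs.
def loopB (max_n : Int) (sets : List (List Int)) (universe_ : List Int) :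
    Nat → Int → List (List Int) → List Int → Bool × Option (List (List Int))
  | 0, _, _, _ => (false, none)
  | fuel + 1, g, lst, stack =>
    if esSol universe_ lst then (true, some lst)
    else if g ≥ (sets.length : Int) ∨ (lst.length : Int) = max_n then
      match stack with
      | [] => (false, none)
      | gf :: rest =>
        loopB max_n sets universe_ fuel (gf + 1)
          (rmF lst ((PySem.List.pyGet? sets gf).getD [])) rest
    else if aporta lst ((PySem.List.pyGet? sets g).getD []) then
      loopB max_n sets universe_ fuel (g + 1)
        (lst ++ [(PySem.List.pyGet? sets g).getD []]) (g :: stack)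
    else loopB max_n sets universe_ fuel (g + 1) lst stack

def backtrack_alt (max_n : Int) (grupo : Int) (asignacion_actual : List (List Int)) (sets : List (List Int)) (universe_ : List Int) : Bool × Option (List (List Int)) :=
  loopB max_n sets universe_ (3 ^ (((sets.length : Int) - grupo).toNat)) grupo asignacion_actual []

-- ===== PRECONDITION & SPEC =====
-- Pre_ excludes exactly the inputs on which A raises IndexError: grupo outside ±len(sets)
-- while neither early exit (the size cap len(asignacion_actual) == max_n, or the partial
-- assignment already covering the universe) returns first.
def Pre_backtrack (max_n : Int) (grupo : Int) (asignacion_actual : List (List Int)) (sets : List (List Int)) (universe_ : List Int) : Prop :=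
  (-(sets.length : Int) ≤ grupo ∧ grupo ≤ (sets.length : Int))
  ∨ (asignacion_actual.length : Int) = max_n
  ∨ esSol universe_ asignacion_actual = true
instance (max_n : Int) (grupo : Int) (asignacion_actual : List (List Int)) (sets : List (List Int)) (universe_ : List Int) : Decidable (Pre_backtrack max_n grupo asignacion_actual sets universe_) := by unfold Pre_backtrack; infer_instance

def pvWitness_backtrack : Int × Int × List (List Int) × List (List Int) × List Int :=
  (2, 0, [], [[1], [2]], [1, 2])

def Spec_backtrack (max_n : Int) (grupo : Int) (asignacion_actual : List (List Int)) (sets : List (List Int)) (universe_ : List Int) (out : Bool × Option (List (List Int))) : Prop := out = backtrack_alt max_n grupo asignacion_actual sets universe_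
instance (max_n : Int) (grupo : Int) (asignacion_actual : List (List Int)) (sets : List (List Int)) (universe_ : List Int) (out : Bool × Option (List (List Int))) : Decidable (Spec_backtrack max_n grupo asignacion_actual sets universe_ out) := by unfold Spec_backtrack; infer_instance

-- ===== CLAIM (what is proved, stated in full; the proofs are below) =====
def Claim_equal_backtrack : Prop := ∀ (max_n : Int) (grupo : Int) (asignacion_actual : List (List Int)) (sets : List (List Int)) (universe_ : List Int), Dom_backtrack max_n grupo asignacion_actual sets universe_ → Pre_backtrack max_n grupo asignacion_actual sets universe_ → Spec_backtrack max_n grupo asignacion_actual sets universe_ (backtrack max_n grupo asignacion_actual sets universe_)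

-- ===== LEMMAS AND PROOFS =====

-- What the machine computes after a failed sub-search left the list in state lst: pop the
-- open include-branches one by one, each time undoing and running A's search on the exclude side.
def resumeS (max_n : Int) (sets : List (List Int)) (universe_ : List Int)
    (lst : List (List Int)) : List Int → Bool × Option (List (List Int))
  | [] => (false, none)
  | gf :: rest =>
    let r := goA max_n sets universe_ (((sets.length : Int) - (gf + 1)).toNat) (gf + 1)
      (rmF lst ((PySem.List.pyGet? sets gf).getD []))
    if r.1 then (true, some r.2) else resumeS max_n sets universe_ r.2 rest

-- Intended value of a machine state: run A's search from (g, lst), then resume the stack.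
def specS (max_n : Int) (sets : List (List Int)) (universe_ : List Int)
    (g : Int) (lst : List (List Int)) (stack : List Int) : Bool × Option (List (List Int)) :=
  let r := goA max_n sets universe_ (((sets.length : Int) - g).toNat) g lst
  if r.1 then (true, some r.2) else resumeS max_n sets universe_ r.2 stack

-- popping one frame: running the machine's pop transition is exactly resuming the stack
lemma specS_pop (max_n : Int) (sets : List (List Int)) (universe_ : List Int)
    (lst : List (List Int)) (gf : Int) (rest : List Int) :
    specS max_n sets universe_ (gf + 1) (rmF lst ((PySem.List.pyGet? sets gf).getD [])) rest
      = resumeS max_n sets universe_ lst (gf :: rest) := by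
  simp only [specS, resumeS]

lemma specS_sol (max_n : Int) (sets : List (List Int)) (universe_ : List Int)
    (g : Int) (lst : List (List Int)) (stack : List Int)
    (hs : esSol universe_ lst = true) :
    specS max_n sets universe_ g lst stack = (true, some lst) := by
  rw [specS, goA.eq_def]
  simp [hs]

lemma specS_fail (max_n : Int) (sets : List (List Int)) (universe_ : List Int)
    (g : Int) (lst : List (List Int)) (stack : List Int)
    (hs : esSol universe_ lst = false)
    (hf : g = (sets.length : Int) ∨ (lst.length : Int) = max_n) :
    specS max_n sets universe_ g lst stack = resumeS max_n sets universe_ lst stack := by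
  have hgoA : goA max_n sets universe_ (((sets.length : Int) - g).toNat) g lst = (false, lst) := by
    by_cases hgn : g = (sets.length : Int)
    · rw [goA.eq_def]; simp [hs, hgn]
    · have hlen : (lst.length : Int) = max_n := by
        rcases hf with h | h
        · exact absurd h hgn
        · exact h
      rw [goA.eq_def]; simp [hs, hgn, hlen]
  simp only [specS, hgoA]
  simp

-- taking the include branch: one goA step with aporta true
lemma specS_step_incl (max_n : Int) (sets : List (List Int)) (universe_ : List Int)
    (g : Int) (lst : List (List Int)) (stack : List Int)
    (hs : esSol universe_ lst = false)
    (hglt : g < (sets.length : Int))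
    (hlen : ¬ (lst.length : Int) = max_n)
    (ha : aporta lst ((PySem.List.pyGet? sets g).getD []) = true) :
    specS max_n sets universe_ g lst stack
      = specS max_n sets universe_ (g + 1)
          (lst ++ [(PySem.List.pyGet? sets g).getD []]) (g :: stack) := by
  have hgn : ¬ g = (sets.length : Int) := by omega
  have hfu : ((sets.length : Int) - g).toNat = ((sets.length : Int) - (g + 1)).toNat + 1 := by
    omega
  have e1 : goA max_n sets universe_ (((sets.length : Int) - g).toNat) g lst
      = (let r := goA max_n sets universe_ (((sets.length : Int) - (g + 1)).toNat) (g + 1)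
             (lst ++ [(PySem.List.pyGet? sets g).getD []]);
         if r.1 then (true, r.2)
         else
           let r2 := goA max_n sets universe_ (((sets.length : Int) - (g + 1)).toNat) (g + 1)
               (rmF r.2 ((PySem.List.pyGet? sets g).getD []));
           if r2.1 then (true, r2.2) else (false, r2.2)) := by
    conv_lhs => rw [hfu, goA.eq_def]
    simp [hs, hgn, hlen, ha]
  simp only [specS, e1, resumeS]
  rcases hr1 : goA max_n sets universe_ (((sets.length : Int) - (g + 1)).toNat) (g + 1)
      (lst ++ [(PySem.List.pyGet? sets g).getD []]) with ⟨b1, l1⟩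
  cases b1
  · rcases hr2 : goA max_n sets universe_ (((sets.length : Int) - (g + 1)).toNat) (g + 1)
        (rmF l1 ((PySem.List.pyGet? sets g).getD [])) with ⟨b2, l2⟩
    cases b2 <;> simp
  · simp

-- taking the exclude branch directly: one goA step with aporta false
lemma specS_step_excl (max_n : Int) (sets : List (List Int)) (universe_ : List Int)
    (g : Int) (lst : List (List Int)) (stack : List Int)
    (hs : esSol universe_ lst = false)
    (hglt : g < (sets.length : Int))
    (hlen : ¬ (lst.length : Int) = max_n)
    (ha : aporta lst ((PySem.List.pyGet? sets g).getD []) = false) :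
    specS max_n sets universe_ g lst stack = specS max_n sets universe_ (g + 1) lst stack := by
  have hgn : ¬ g = (sets.length : Int) := by omega
  have hfu : ((sets.length : Int) - g).toNat = ((sets.length : Int) - (g + 1)).toNat + 1 := by
    omega
  have e1 : goA max_n sets universe_ (((sets.length : Int) - g).toNat) g lst
      = (let r2 := goA max_n sets universe_ (((sets.length : Int) - (g + 1)).toNat) (g + 1) lst;
         if r2.1 then (true, r2.2) else (false, r2.2)) := by
    conv_lhs => rw [hfu, goA.eq_def]
    simp [hs, hgn, hlen, ha]
  simp only [specS, e1]
  rcases hr1 : goA max_n sets universe_ (((sets.length : Int) - (g + 1)).toNat) (g + 1) lst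
    with ⟨b1, l1⟩
  cases b1 <;> simp

lemma loopB_eq_specS (max_n : Int) (sets : List (List Int)) (universe_ : List Int) :
    ∀ (N : Nat) (g : Int) (lst : List (List Int)) (stack : List Int),
      3 ^ (((sets.length : Int) - g).toNat)
        + (stack.map (fun gf => 3 ^ (((sets.length : Int) - (gf + 1)).toNat))).sum ≤ N →
      g ≤ (sets.length : Int) →
      (∀ gf ∈ stack, gf < (sets.length : Int)) →
      loopB max_n sets universe_ N g lst stack = specS max_n sets universe_ g lst stack := by
  intro N
  induction N with
  | zero =>
    intro g lst stack hN _ _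
    have h1 : 0 < 3 ^ (((sets.length : Int) - g).toNat) := pow_pos (by norm_num) _
    omega
  | succ N ih =>
    intro g lst stack hN hg hstack
    by_cases hs : esSol universe_ lst = true
    · rw [specS_sol max_n sets universe_ g lst stack hs]
      simp only [loopB]
      simp [hs]
    · have hs' : esSol universe_ lst = false := by simpa using hs
      by_cases hf : g ≥ (sets.length : Int) ∨ (lst.length : Int) = max_n
      · have hf' : g = (sets.length : Int) ∨ (lst.length : Int) = max_n := by
          rcases hf with h | h
          · exact Or.inl (le_antisymm hg h)
          · exact Or.inr h
        rw [specS_fail max_n sets universe_ g lst stack hs' hf']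
        simp only [loopB]
        rw [if_neg (by simp [hs']), if_pos hf]
        cases stack with
        | nil => simp [resumeS]
        | cons gf rest =>
          have hmem : gf < (sets.length : Int) := hstack gf List.mem_cons_self
          have h1 : 0 < 3 ^ (((sets.length : Int) - g).toNat) := pow_pos (by norm_num) _
          simp only [List.map_cons, List.sum_cons] at hN
          exact (ih (gf + 1) (rmF lst ((PySem.List.pyGet? sets gf).getD [])) rest
            (by omega) (by omega)
            (fun x hx => hstack x (List.mem_cons_of_mem _ hx))).trans
            (specS_pop max_n sets universe_ lst gf rest)
      · have hglt : g < (sets.length : Int) := by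
          rcases not_or.mp hf with ⟨h1, _⟩
          omega
        have hlen : ¬ (lst.length : Int) = max_n := (not_or.mp hf).2
        have hfu : ((sets.length : Int) - g).toNat
            = ((sets.length : Int) - (g + 1)).toNat + 1 := by omega
        simp only [loopB]
        rw [if_neg (by simp [hs']), if_neg hf]
        by_cases ha : aporta lst ((PySem.List.pyGet? sets g).getD []) = true
        · rw [if_pos ha]
          rw [ih (g + 1) (lst ++ [(PySem.List.pyGet? sets g).getD []]) (g :: stack)
            (by
              simp only [List.map_cons, List.sum_cons]
              rw [hfu, pow_succ] at hN
              have h1 : 0 < 3 ^ (((sets.length : Int) - (g + 1)).toNat) := pow_pos (by norm_num) _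
              omega)
            (by omega)
            (by
              intro x hx
              rcases List.mem_cons.mp hx with h | h
              · omega
              · exact hstack x h)]
          exact (specS_step_incl max_n sets universe_ g lst stack hs' hglt hlen ha).symm
        · have ha' : aporta lst ((PySem.List.pyGet? sets g).getD []) = false := by simpa using ha
          rw [if_neg (by simp [ha']), ih (g + 1) lst stack
            (by
              rw [hfu, pow_succ] at hN
              have h1 : 0 < 3 ^ (((sets.length : Int) - (g + 1)).toNat) := pow_pos (by norm_num) _
              omega)
            (by omega) hstack]
          exact (specS_step_excl max_n sets universe_ g lst stack hs' hglt hlen ha').symm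

-- ===== VERDICT (by name: the statement is the Claim_ definition above) =====
theorem backtrack_spec : Claim_equal_backtrack := by
  intro max_n grupo lst sets universe_ _ hpre
  unfold Spec_backtrack backtrack backtrack_alt
  by_cases hg : -(sets.length : Int) ≤ grupo ∧ grupo ≤ (sets.length : Int)
  · rw [loopB_eq_specS max_n sets universe_
      (3 ^ (((sets.length : Int) - grupo).toNat)) grupo lst [] (by simp) hg.2 (by simp)]
    rcases hR : goA max_n sets universe_ (((sets.length : Int) - grupo).toNat) grupo lst
      with ⟨b, l⟩
    cases b <;> simp [specS, resumeS, hR]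
  · have hgn : ¬ grupo = (sets.length : Int) := by
      rcases not_and_or.mp hg with h | h <;> omega
    have hm : 3 ^ (((sets.length : Int) - grupo).toNat)
        = (3 ^ (((sets.length : Int) - grupo).toNat) - 1) + 1 := by
      have h1 : 0 < 3 ^ (((sets.length : Int) - grupo).toNat) := pow_pos (by norm_num) _
      omega
    by_cases hsol : esSol universe_ lst = true
    · rw [hm, goA.eq_def]
      simp only [loopB]
      simp [hsol]
    · have hs' : esSol universe_ lst = false := by simpa using hsol
      have hlen : (lst.length : Int) = max_n := by
        rcases hpre with h | h | h
        · exact absurd h hg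
        · exact h
        · exact absurd h hsol
      rw [hm, goA.eq_def]
      simp only [loopB]
      simp [hs', hgn, hlen]
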